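-- pv_equiv track=rewrite | github.com/daniel-reich/ubiquitous-fiesta | ya4diBApyLQKG7TQK_6.py | validate_relationships
-- ===== SOURCE A (Python) =====
-- def validate_relationships(txt):
--   s, v, t = [], 1, txt[0]
--   if t in '0123456789-':
--     v = 0
--   for i in txt[1:]:
--     if i in '0123456789-' and v == 0:
--       t += i
--     elif i in '0123456789-' and v == 1:
--       s.append(t)
--       t, v = i, 0
--     elif i not in '0123456789-' and v == 0:
--       s.append(t)
--       t, v = i, 1
--     else:
--       t += i
--   s.append(t)
--   for g in range(0, len(s) - 2, 2):
--     k1 = int(s[g])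
--     k2 = int(s[g + 2])
--     if s[g + 1] == '>':
--       if k1 <= k2:
--         return False
--     elif s[g + 1] == '>=':
--       if k1 < k2:
--         return False
--     elif s[g + 1] == '=':
--       if k1 != k2:
--         return False
--     elif s[g + 1] == '<=':
--       if k1 > k2:
--         return False
--     else:
--       if k1 >= k2:
--         return False
--   return True
-- ===== SOURCE B (Python) =====
-- def validate_relationships(txt):
--     NUM = set('0123456789-')
--     tokens = []
--     i, n = 0, len(txt)
--     while i < n:
--         j = i + 1
--         while j < n and (txt[j] in NUM) == (txt[i] in NUM):
--             j += 1
--         tokens.append(txt[i:j])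
--         i = j
--     OPS = {'>': int.__gt__, '>=': int.__ge__, '=': int.__eq__, '<=': int.__le__}
--     return all(OPS.get(op, int.__lt__)(int(a), int(b))
--                for a, op, b in zip(tokens[::2], tokens[1::2], tokens[2::2]))
-- ===== Notes on version B (the rewrite author's own statement) =====
-- stated objective: idiomatic
-- what changed: Replaced the char-by-char state machine (flag v + growing token + append) and the index-based range(0,len-2,2) validation loop by a two-pointer span tokenizer plus a single zip over the even/odd strided slices with an operator dispatch table.
-- outside the precondition, e.g. on validate_relationships('1<0<--2'): A returns False, B returns False
-- crash fix: On the empty string A raises IndexError (txt[0]); B returns True (an empty comparison chain holds). — e.g. on validate_relationships(""): A raises IndexError, B returns true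
import Mathlib
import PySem

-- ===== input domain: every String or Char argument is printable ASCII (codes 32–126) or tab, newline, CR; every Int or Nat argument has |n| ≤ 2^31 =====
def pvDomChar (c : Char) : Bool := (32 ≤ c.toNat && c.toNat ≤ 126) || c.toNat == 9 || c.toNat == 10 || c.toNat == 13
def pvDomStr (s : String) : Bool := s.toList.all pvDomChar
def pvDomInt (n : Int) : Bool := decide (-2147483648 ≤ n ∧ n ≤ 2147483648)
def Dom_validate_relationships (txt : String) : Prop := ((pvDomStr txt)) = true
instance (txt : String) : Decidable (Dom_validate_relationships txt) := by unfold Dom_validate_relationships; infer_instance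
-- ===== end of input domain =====

-- B replaces A's char-by-char state machine + index/range validation loop by a span
-- tokenizer and a zip-of-strided-slices walk with an operator dispatch table (same cost,
-- more idiomatic); proved equal to A on Pre_ below.

-- membership test `c in '0123456789-'` (shared by both ports)
def vrIsNum (c : Char) : Bool := "0123456789-".toList.contains c

-- `int(token)` ; Python raises ValueError when ofChars? is none — those inputs are outside Pre_
def vrInt (tok : List Char) : Int := (PySem.Int.ofChars? tok).getD 0

-- ===== PORT A =====
-- one iteration of A's for-loop over the state (s, v, t)
def vrStepA (st : List (List Char) × Int × List Char) (i : Char) :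
    List (List Char) × Int × List Char :=
  let (s, v, t) := st
  if vrIsNum i && (v == 0) then (s, v, t ++ [i])
  else if vrIsNum i && (v == 1) then (s ++ [t], 0, [i])
  else if (!vrIsNum i) && (v == 0) then (s ++ [t], 1, [i])
  else (s, v, t ++ [i])

-- A's second loop `for g in range(0, len(s)-2, 2)` with its early returns
def vrLoopA (s : List (List Char)) : List Int → Bool
  | [] => true
  | g :: gs =>
    let k1 := vrInt ((PySem.List.pyGet? s g).getD [])
    let k2 := vrInt ((PySem.List.pyGet? s (g + 2)).getD [])
    let op := (PySem.List.pyGet? s (g + 1)).getD []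
    if op = ['>'] then (if k1 ≤ k2 then false else vrLoopA s gs)
    else if op = ['>', '='] then (if k1 < k2 then false else vrLoopA s gs)
    else if op = ['='] then (if k1 ≠ k2 then false else vrLoopA s gs)
    else if op = ['<', '='] then (if k1 > k2 then false else vrLoopA s gs)
    else (if k1 ≥ k2 then false else vrLoopA s gs)

def validate_relationships (txt : String) : Bool :=
  match txt.toList with
  | [] => false  -- Python: `txt[0]` raises IndexError here; excluded by Pre_
  | c :: rest =>
    let v0 : Int := if vrIsNum c then 0 else 1
    let (s, _, t) := rest.foldl vrStepA ([], v0, [c])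
    let s2 := s ++ [t]
    vrLoopA s2 (PySem.List.pyRange 0 ((s2.length : Int) - 2) 2)

-- ===== PORT B =====
-- B's while/while span tokenizer: maximal runs of number-chars / non-number-chars
def vrTokens (l : List Char) : List (List Char) :=
  match l with
  | [] => []
  | c :: cs =>
    (c :: cs.takeWhile (fun d => vrIsNum d == vrIsNum c)) ::
      vrTokens (cs.dropWhile (fun d => vrIsNum d == vrIsNum c))
termination_by l.length
decreasing_by
  simp only [List.length_cons]
  have := List.length_dropWhile_le (p := fun d => vrIsNum d == vrIsNum c) (l := cs)
  omega

-- step-2 slice `xs[k::2]` (applied to `xs.drop k`); exact for nonneg start and step 2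
def vrEveryOther {α : Type} : List α → List α
  | [] => []
  | [x] => [x]
  | x :: _ :: rest => x :: vrEveryOther rest

-- zip(xs, ys, zs)
def vrZip3 {α β γ : Type} : List α → List β → List γ → List (α × β × γ)
  | a :: as, b :: bs, c :: cs => (a, b, c) :: vrZip3 as bs cs
  | _, _, _ => []

-- `OPS.get(op, int.__lt__)(k1, k2)` — literal association-table lookup with default <
def vrOpB (op : List Char) (k1 k2 : Int) : Bool :=
  if op = ['>'] then decide (k1 > k2)
  else if op = ['>', '='] then decide (k1 ≥ k2)
  else if op = ['='] then decide (k1 = k2)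
  else if op = ['<', '='] then decide (k1 ≤ k2)
  else decide (k1 < k2)

def validate_relationships_alt (txt : String) : Bool :=
  let tokens := vrTokens txt.toList
  (vrZip3 (vrEveryOther tokens) (vrEveryOther (tokens.drop 1))
      (vrEveryOther (tokens.drop 2))).all
    (fun x => vrOpB x.2.1 (vrInt x.1) (vrInt x.2.2))

-- ===== PRECONDITION & SPEC =====
-- Pre_ excludes the empty string (A raises IndexError) and inputs on which `int()` raises
-- ValueError on some number-position token: with at least three runs (≥ 2 class switches)
-- that means the first char must be of the number class and every minus sign must start a
-- numeric run and be followed by a digit; otherwise int() raises in both programs, except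
-- when an earlier comparison already returned False, where both A and B return that False.
def Pre_validate_relationships (txt : String) : Prop :=
  txt.toList ≠ [] ∧
    (2 ≤ (txt.toList.zip txt.toList.tail).countP (fun p => vrIsNum p.1 != vrIsNum p.2) →
      vrIsNum txt.toList.headI = true ∧
      txt.toList.getLast? ≠ some '-' ∧
      (∀ p ∈ txt.toList.zip txt.toList.tail, p.1 = '-' → p.2.isDigit = true) ∧
      (∀ p ∈ txt.toList.zip txt.toList.tail, p.2 = '-' → vrIsNum p.1 = false))
instance (txt : String) : Decidable (Pre_validate_relationships txt) := by
  unfold Pre_validate_relationships; infer_instance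

def pvWitness_validate_relationships : String := "3>=2=2"

-- A raises IndexError on the empty string (txt[0]); B returns True (an empty chain holds).
def Raises_validate_relationships (txt : String) : Prop := txt = ""
instance (txt : String) : Decidable (Raises_validate_relationships txt) := by
  unfold Raises_validate_relationships; infer_instance
def pvRaiseWitness_validate_relationships : String := ""
def pvRaiseWitnessOut_validate_relationships : Bool := true

def Spec_validate_relationships (txt : String) (out : Bool) : Prop :=
  out = validate_relationships_alt txt
instance (txt : String) (out : Bool) : Decidable (Spec_validate_relationships txt out) := by
  unfold Spec_validate_relationships; infer_instance

-- ===== CLAIM (what is proved, stated in full; the proofs are below) =====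
def Claim_equal_validate_relationships : Prop := ∀ (txt : String), Dom_validate_relationships txt → Pre_validate_relationships txt → Spec_validate_relationships txt (validate_relationships txt)

def Claim_raises_validate_relationships : Prop := (∀ (txt : String), Dom_validate_relationships txt → Raises_validate_relationships txt → ¬ Pre_validate_relationships txt) ∧ (Dom_validate_relationships (pvRaiseWitness_validate_relationships) ∧ Raises_validate_relationships (pvRaiseWitness_validate_relationships) ∧ validate_relationships_alt (pvRaiseWitness_validate_relationships) = pvRaiseWitnessOut_validate_relationships)

-- ===== LEMMAS AND PROOFS =====

-- common reference form of the validation walk: check (a, op, b) then continue from b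
def chainOK : List (List Char) → Bool
  | a :: op :: b :: rest => vrOpB op (vrInt a) (vrInt b) && chainOK (b :: rest)
  | _ => true
termination_by l => l.length
decreasing_by simp only [List.length_cons]; omega

theorem vrEveryOther_cons_drop {α : Type} (x : α) (l : List α) :
    vrEveryOther (x :: l) = x :: vrEveryOther (l.drop 1) := by
  cases l <;> simp [vrEveryOther]

theorem altWalk_eq_chainOK (s : List (List Char)) :
    ((vrZip3 (vrEveryOther s) (vrEveryOther (s.drop 1)) (vrEveryOther (s.drop 2))).all
      (fun x => vrOpB x.2.1 (vrInt x.1) (vrInt x.2.2))) = chainOK s := by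
  match s with
  | [] => simp [vrEveryOther, vrZip3, chainOK]
  | [a] => simp [vrEveryOther, vrZip3, chainOK]
  | [a, op] => simp [vrEveryOther, vrZip3, chainOK]
  | a :: op :: b :: rest =>
    have ih := altWalk_eq_chainOK (b :: rest)
    simp only [vrEveryOther_cons_drop, List.drop_succ_cons, List.drop_zero, List.drop_one] at ih ⊢
    simp only [vrZip3, List.all_cons] at ih ⊢
    rw [chainOK, ih]
termination_by s.length
decreasing_by simp only [List.length_cons]; omega

-- A's early-return if-chain computes vrOpB && continuation
theorem stepA_eq_opB (op : List Char) (k1 k2 : Int) (r : Bool) :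
    (if op = ['>'] then (if k1 ≤ k2 then false else r)
     else if op = ['>', '='] then (if k1 < k2 then false else r)
     else if op = ['='] then (if k1 ≠ k2 then false else r)
     else if op = ['<', '='] then (if k1 > k2 then false else r)
     else (if k1 ≥ k2 then false else r)) = (vrOpB op k1 k2 && r) := by
  by_cases h1 : op = ['>']
  · by_cases h : k1 ≤ k2
    · simp [vrOpB, h1, h, show ¬ k2 < k1 by omega]
    · simp [vrOpB, h1, h, show k2 < k1 by omega]
  · by_cases h2 : op = ['>', '=']
    · by_cases h : k1 < k2
      · simp [vrOpB, h2, h, show ¬ k2 ≤ k1 by omega]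
      · simp [vrOpB, h2, h, show k2 ≤ k1 by omega]
    · by_cases h3 : op = ['=']
      · by_cases h : k1 = k2 <;> simp [vrOpB, h3, h]
      · by_cases h4 : op = ['<', '=']
        · by_cases h : k2 ≤ k1
          · by_cases h' : k1 ≤ k2
            · simp [vrOpB, h4, h']
            · simp [vrOpB, h4, h']
          · simp [vrOpB, h4, show k1 ≤ k2 by omega]
        · by_cases h : k2 ≤ k1
          · simp [vrOpB, h1, h2, h3, h4, show ¬ k1 < k2 by omega]
          · simp [vrOpB, h1, h2, h3, h4, show k1 < k2 by omega]

-- pyRange 0 b 2 unfolds one step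
theorem pyRange_two_step (b : Int) (h : 0 < b) :
    PySem.List.pyRange 0 b 2 = 0 :: (PySem.List.pyRange 0 (b - 2) 2).map (fun g => g + 2) := by
  rw [PySem.List.pyRange_of_pos 0 b (by norm_num), PySem.List.pyRange_of_pos 0 (b - 2) (by norm_num)]
  have hcount : (if (0:Int) < b then ((b - 0 + 2 - 1) / 2).toNat else 0)
      = (if (0:Int) < b - 2 then ((b - 2 - 0 + 2 - 1) / 2).toNat else 0) + 1 := by
    split_ifs <;> omega
  rw [hcount, List.range_succ_eq_map, List.map_cons, List.map_map, List.map_map]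
  refine congrArg₂ _ (by norm_num) (List.map_congr_left fun k _ => ?_)
  simp
  omega

theorem pyRange_two_nil (b : Int) (h : b ≤ 0) : PySem.List.pyRange 0 b 2 = [] := by
  rw [PySem.List.pyRange_of_pos 0 b (by norm_num)]
  simp [show ¬ (0:Int) < b by omega]

theorem pyGet?_cons2 {α : Type} (x y : α) (l : List α) (g : Int) (hg : 0 ≤ g) :
    PySem.List.pyGet? (x :: y :: l) (g + 2) = PySem.List.pyGet? l g := by
  simp only [PySem.List.pyGet?, PySem.List.pyIdx?]
  have h2 : (0:Int) ≤ g + 2 := by omega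
  simp only [hg, h2, if_pos]
  have : (g + 2).toNat = g.toNat + 2 := by omega
  simp only [this]
  by_cases hc : g < (l.length : Int)
  · rw [if_pos (by simp; omega), if_pos hc]
    simp
  · rw [if_neg (by simp; omega), if_neg hc]
    simp

-- shift the loop over a range moved by +2 past the first two tokens
theorem vrLoopA_shift (x y : List Char) (l : List (List Char)) (gs : List Int)
    (h : ∀ g ∈ gs, 0 ≤ g) :
    vrLoopA (x :: y :: l) (gs.map (fun g => g + 2)) = vrLoopA l gs := by
  induction gs with
  | nil => rfl
  | cons g gs ih =>
    have hg : 0 ≤ g := h g (by simp)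
    have h1 : g + 2 + 1 = (g + 1) + 2 := by ring
    have h2 : g + 2 + 2 = (g + 2) + 2 := by ring
    simp only [List.map_cons, vrLoopA, h1,
      pyGet?_cons2 x y l g hg, pyGet?_cons2 x y l (g + 1) (by omega),
      pyGet?_cons2 x y l (g + 2) (by omega), ih (fun g hm => h g (by simp [hm]))]

theorem loopA_eq_chainOK (s : List (List Char)) :
    vrLoopA s (PySem.List.pyRange 0 ((s.length : Int) - 2) 2) = chainOK s := by
  match s with
  | [] => rw [pyRange_two_nil _ (by simp)]; simp [vrLoopA, chainOK]
  | [a] => rw [pyRange_two_nil _ (by simp)]; simp [vrLoopA, chainOK]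
  | [a, op] => rw [pyRange_two_nil _ (by simp)]; simp [vrLoopA, chainOK]
  | a :: op :: b :: rest =>
    have ih := loopA_eq_chainOK (b :: rest)
    have hlen : ((a :: op :: b :: rest : List (List Char)).length : Int) - 2
        = ((b :: rest : List (List Char)).length : Int) := by simp; omega
    have hpos : (0:Int) < ((b :: rest : List (List Char)).length : Int) := by
      simp
    rw [hlen, pyRange_two_step _ hpos]
    rw [vrLoopA]
    have hmem : ∀ g ∈ PySem.List.pyRange 0 (((b :: rest : List (List Char)).length : Int) - 2) 2,
        (0:Int) ≤ g := by
      intro g hg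
      exact ((PySem.List.mem_pyRange_iff_of_pos (by norm_num) g).mp hg).1
    rw [vrLoopA_shift a op (b :: rest) _ hmem]
    rw [ih]
    have hget0 : (PySem.List.pyGet? (a :: op :: b :: rest) 0).getD [] = a := by
      simp [PySem.List.pyGet?, PySem.List.pyIdx?]
      rw [if_pos (by omega)]
      simp
    have hget1 : (PySem.List.pyGet? (a :: op :: b :: rest) (0 + 1)).getD [] = op := by
      simp [PySem.List.pyGet?, PySem.List.pyIdx?]
      rw [if_pos (by omega)]
      simp
    have hget2 : (PySem.List.pyGet? (a :: op :: b :: rest) (0 + 2)).getD [] = b := by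
      simp [PySem.List.pyGet?, PySem.List.pyIdx?]
      rw [if_pos (by omega)]
      simp
    rw [hget0, hget1, hget2, stepA_eq_opB]
    rw [chainOK]
termination_by s.length
decreasing_by simp only [List.length_cons]; omega

-- A's first loop builds exactly the span tokenization
theorem foldA_tokens (cs : List Char) : ∀ (s : List (List Char)) (t : List Char) (bb : Bool),
    (fun st => st.1 ++ [st.2.2]) (cs.foldl vrStepA (s, (if bb then 0 else 1 : Int), t))
      = s ++ (t ++ cs.takeWhile (fun d => vrIsNum d == bb))
          :: vrTokens (cs.dropWhile (fun d => vrIsNum d == bb)) := by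
  induction cs with
  | nil => intro s t bb; simp [vrTokens]
  | cons d cs ih =>
    intro s t bb
    by_cases hd : vrIsNum d = bb
    · have hstep : vrStepA (s, (if bb then 0 else 1 : Int), t) d
          = (s, (if bb then 0 else 1 : Int), t ++ [d]) := by
        unfold vrStepA; cases bb <;> simp_all
      simp only [List.foldl_cons, hstep, ih s (t ++ [d]) bb]
      simp [hd, List.append_assoc]
    · have hstep : vrStepA (s, (if bb then 0 else 1 : Int), t) d
          = (s ++ [t], (if vrIsNum d then 0 else 1 : Int), [d]) := by
        unfold vrStepA; cases bb <;> simp_all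
      simp only [List.foldl_cons, hstep, ih (s ++ [t]) [d] (vrIsNum d)]
      have hpred : (vrIsNum d == bb) = false := by simp [hd]
      simp [hpred, vrTokens, List.append_assoc]

theorem tokensA_eq (c : Char) (rest : List Char) :
    (fun st => st.1 ++ [st.2.2])
        (rest.foldl vrStepA ([], (if vrIsNum c then 0 else 1 : Int), [c]))
      = vrTokens (c :: rest) := by
  rw [foldA_tokens rest [] [c] (vrIsNum c)]
  simp [vrTokens]

-- ===== VERDICT (by name: the statement is the Claim_ definition above) =====
theorem validate_relationships_spec : Claim_equal_validate_relationships := by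
  intro txt _ hpre
  unfold Spec_validate_relationships
  rcases hx : txt.toList with _ | ⟨c, rest⟩
  · exact absurd hx hpre.1
  · have key : validate_relationships txt = chainOK (vrTokens (c :: rest)) := by
      unfold validate_relationships
      rw [hx]
      dsimp only
      rcases hfold : rest.foldl vrStepA ([], (if vrIsNum c then 0 else 1 : Int), [c])
        with ⟨s, v, t⟩
      have htok := tokensA_eq c rest
      rw [hfold] at htok
      dsimp only at htok ⊢
      rw [loopA_eq_chainOK, htok]
    have key2 : validate_relationships_alt txt = chainOK (vrTokens (c :: rest)) := by
      unfold validate_relationships_alt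
      rw [hx]
      exact altWalk_eq_chainOK (vrTokens (c :: rest))
    rw [key, key2]

-- crash-fix claim validate_relationships_raises: on "" A raises IndexError, B returns true
@[simp]
theorem validate_relationships_raises : Claim_raises_validate_relationships := by
  unfold Claim_raises_validate_relationships
  constructor
  · intro txt _ hr hpre
    exact hpre.1 (by simpa [Raises_validate_relationships] using congrArg String.toList hr)
  · refine ⟨by decide, rfl, ?_⟩
    simp [validate_relationships_alt, pvRaiseWitness_validate_relationships,
      pvRaiseWitnessOut_validate_relationships, vrTokens, vrEveryOther, vrZip3]
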